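-- pv_equiv track=rewrite | github.com/dennouninas/MCMAPRA-v1 | mcmapra/conciliation/condorcet.py | _calculer_copeland
-- ===== SOURCE A (Python) =====
-- from typing import Dict, List, Optional, Tuple
--
-- def _calculer_copeland(
--
--     candidats: List[int],
--     dom: Dict[Tuple[int,int], bool],
-- ) -> Dict[int, int]:
--     """
--     Copeland(p) = |{q : p≻q}| − |{q : q≻p}| — Éq. (11)
--     Résout les cycles du paradoxe de Condorcet.
--     """
--     scores = {}
--     for p in candidats:
--         victoires = sum(1 for q in candidats if q != p and dom.get((p, q), False))
--         defaites  = sum(1 for q in candidats if q != p and dom.get((q, p), False))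
--         scores[p] = victoires - defaites
--     return scores
-- ===== SOURCE B (Python) =====
-- def _calculer_copeland(candidats, dom):
--     # One pass over the domination edges instead of two O(n) scans per candidate;
--     # each edge is weighted by the opponent's multiplicity in `candidats`.
--     counts = {}
--     for p in candidats:
--         counts[p] = counts.get(p, 0) + 1
--     scores = {p: 0 for p in candidats}
--     for (a, b), won in dom.items():
--         if won and a != b and a in counts and b in counts:
--             scores[a] += counts[b]
--             scores[b] -= counts[a]
--     return scores
-- ===== Notes on version B (the rewrite author's own statement) =====
-- stated objective: faster
-- what changed: Instead of two O(n) scans over candidats per candidate (dict lookups inside nested comprehensions), B makes a single pass over the domination dict's entries, adding each valid edge's contribution to the winner and subtracting it from the loser, weighted by the opponent's multiplicity in candidats.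
import Mathlib
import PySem

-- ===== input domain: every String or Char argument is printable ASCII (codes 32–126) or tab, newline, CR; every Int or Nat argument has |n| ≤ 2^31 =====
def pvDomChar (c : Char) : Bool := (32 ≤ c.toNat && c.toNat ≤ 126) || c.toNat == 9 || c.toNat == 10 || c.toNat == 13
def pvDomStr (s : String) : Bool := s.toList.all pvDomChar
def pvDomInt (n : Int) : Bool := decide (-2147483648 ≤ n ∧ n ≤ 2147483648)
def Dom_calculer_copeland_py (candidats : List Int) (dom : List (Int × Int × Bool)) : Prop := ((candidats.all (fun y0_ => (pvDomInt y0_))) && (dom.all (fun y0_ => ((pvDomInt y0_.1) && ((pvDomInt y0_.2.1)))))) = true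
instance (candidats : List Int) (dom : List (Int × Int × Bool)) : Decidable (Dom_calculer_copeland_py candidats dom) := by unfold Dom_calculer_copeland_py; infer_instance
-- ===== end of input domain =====

-- B replaces A's two O(n) scans per candidate by a single pass over the domination
-- edges, each edge weighted by the opponent's multiplicity in `candidats` (objective: faster).

-- ===== PORT A =====
def calculer_copeland_py (candidats : List Int) (dom : List (Int × Int × Bool)) : List (Int × Int) :=
  -- the dict parameter `dom` as a PySem.Dict over keys (a, b)
  let d : PySem.Dict (Int × Int) Bool := PySem.Dict.mk (dom.map (fun e => ((e.1, e.2.1), e.2.2)))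
  let scores : PySem.Dict Int Int :=
    candidats.foldl (fun scores p =>
      let victoires : Int :=
        (candidats.map (fun q => if q ≠ p ∧ d.getD (p, q) false = true then (1 : Int) else 0)).sum
      let defaites : Int :=
        (candidats.map (fun q => if q ≠ p ∧ d.getD (q, p) false = true then (1 : Int) else 0)).sum
      scores.insert p (victoires - defaites)) PySem.Dict.empty
  scores.items

-- ===== PORT B =====
def calculer_copeland_py_alt (candidats : List Int) (dom : List (Int × Int × Bool)) : List (Int × Int) :=
  let counts : PySem.Dict Int Int :=
    candidats.foldl (fun d p => d.insert p (d.getD p 0 + 1)) PySem.Dict.empty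
  let scores0 : PySem.Dict Int Int :=
    candidats.foldl (fun d p => d.insert p (0 : Int)) PySem.Dict.empty
  let scores : PySem.Dict Int Int :=
    dom.foldl (fun s e =>
      if e.2.2 = true ∧ e.1 ≠ e.2.1 ∧ counts.contains e.1 = true ∧ counts.contains e.2.1 = true then
        (s.modify e.1 0 (· + counts.getD e.2.1 0)).modify e.2.1 0 (· - counts.getD e.1 0)
      else s) scores0
  scores.items

-- ===== PRECONDITION & SPEC =====
-- Pre_ excludes association lists whose (a, b) keys repeat: a Python dict never has
-- duplicate keys, so such a list does not represent any input A actually receives.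
def Pre_calculer_copeland_py (candidats : List Int) (dom : List (Int × Int × Bool)) : Prop :=
  (dom.map (fun e => (e.1, e.2.1))).Nodup
instance (candidats : List Int) (dom : List (Int × Int × Bool)) : Decidable (Pre_calculer_copeland_py candidats dom) := by unfold Pre_calculer_copeland_py; infer_instance

def pvWitness_calculer_copeland_py : List Int × (List (Int × Int × Bool)) :=
  ([1, 2, 3], [(1, 2, true), (2, 3, true), (3, 1, false)])

def Spec_calculer_copeland_py (candidats : List Int) (dom : List (Int × Int × Bool)) (out : List (Int × Int)) : Prop := out = calculer_copeland_py_alt candidats dom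
instance (candidats : List Int) (dom : List (Int × Int × Bool)) (out : List (Int × Int)) : Decidable (Spec_calculer_copeland_py candidats dom out) := by unfold Spec_calculer_copeland_py; infer_instance

-- ===== CLAIM (what is proved, stated in full; the proofs are below) =====
def Claim_equal_calculer_copeland_py : Prop := ∀ (candidats : List Int) (dom : List (Int × Int × Bool)), Dom_calculer_copeland_py candidats dom → Pre_calculer_copeland_py candidats dom → Spec_calculer_copeland_py candidats dom (calculer_copeland_py candidats dom)

-- ===== LEMMAS AND PROOFS =====

-- `dom.get((p, q), False)` of the assoc list
def pvLk (dom : List (Int × Int × Bool)) (p q : Int) : Bool :=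
  (PySem.Dict.mk (dom.map (fun e => ((e.1, e.2.1), e.2.2)))).getD (p, q) false

lemma pvLk_nil (p q : Int) : pvLk [] p q = false := rfl

lemma pvLk_cons (e : Int × Int × Bool) (rest : List (Int × Int × Bool)) (p q : Int) :
    pvLk (e :: rest) p q = if e.1 = p ∧ e.2.1 = q then e.2.2 else pvLk rest p q := by
  simp only [pvLk, List.map_cons, PySem.Dict.getD_eq_get?_getD, PySem.Dict.get?_mk_cons]
  by_cases h : e.1 = p ∧ e.2.1 = q
  · obtain ⟨h1, h2⟩ := h; simp [h1, h2]
  · have : ((e.1, e.2.1) == (p, q)) = false := by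
      simp only [beq_eq_false_iff_ne, ne_eq, Prod.mk.injEq]; tauto
    simp [this, h]

lemma pvLk_of_not_mem (rest : List (Int × Int × Bool)) (p q : Int)
    (h : (p, q) ∉ rest.map (fun e => (e.1, e.2.1))) : pvLk rest p q = false := by
  induction rest with
  | nil => exact pvLk_nil p q
  | cons e rest ih =>
      simp only [List.map_cons, List.mem_cons, not_or] at h
      rw [pvLk_cons]
      have : ¬ (e.1 = p ∧ e.2.1 = q) := by
        rintro ⟨h1, h2⟩; exact h.1 (by simp [h1, h2])
      simp [this, ih h.2]

-- the per-candidate value A inserts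
def pvScore (candidats : List Int) (dom : List (Int × Int × Bool)) (p : Int) : Int :=
  (candidats.map (fun q => if q ≠ p ∧ pvLk dom p q = true then (1 : Int) else 0)).sum
  - (candidats.map (fun q => if q ≠ p ∧ pvLk dom q p = true then (1 : Int) else 0)).sum

-- the net contribution of one edge to candidate k in B's pass
def pvContrib (candidats : List Int) (e : Int × Int × Bool) (k : Int) : Int :=
  (if e.2.2 = true ∧ e.1 ≠ e.2.1 ∧ e.1 ∈ candidats ∧ e.2.1 ∈ candidats ∧ e.1 = k then (candidats.count e.2.1 : Int) else 0)
  - (if e.2.2 = true ∧ e.1 ≠ e.2.1 ∧ e.1 ∈ candidats ∧ e.2.1 ∈ candidats ∧ e.2.1 = k then (candidats.count e.1 : Int) else 0)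

def pvDelta (candidats : List Int) (dom : List (Int × Int × Bool)) (k : Int) : Int :=
  (dom.map (fun e => pvContrib candidats e k)).sum

-- getD through a fold of inserts whose value depends only on the key
lemma getD_foldl_insert_fun (l : List Int) (f : Int → Int) (d : PySem.Dict Int Int) (k d0 : Int) :
    (l.foldl (fun s p => s.insert p (f p)) d).getD k d0 = if k ∈ l then f k else d.getD k d0 := by
  induction l generalizing d with
  | nil => simp
  | cons p l ih =>
      simp only [List.foldl_cons, ih, PySem.Dict.getD_insert, List.mem_cons]
      by_cases hkl : k ∈ l
      · simp [hkl]
      · by_cases hkp : k = p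
        · simp [hkp]
        · simp [hkp]

-- moving a pointwise-equal-except-at-x function through a sum
lemma sum_map_update_point (l : List Int) (F G : Int → Int) (x : Int)
    (h : ∀ q, q ≠ x → F q = G q) :
    (l.map F).sum = (l.map G).sum + (l.count x : Int) * (F x - G x) := by
  induction l with
  | nil => simp
  | cons a l ih =>
      by_cases ha : a = x
      · subst ha
        simp only [List.map_cons, List.sum_cons, ih, List.count_cons_self]
        push_cast; ring
      · have hc : List.count x (a :: l) = List.count x l := by
          rw [List.count_cons_of_ne]; exact fun hax => ha hax
        simp only [List.map_cons, List.sum_cons, ih, hc, h a ha]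
        ring

-- A's "victoires" scan equals B's win contributions, given unique edge keys
lemma pvWins (candidats : List Int) (dom : List (Int × Int × Bool))
    (hnd : (dom.map (fun e => (e.1, e.2.1))).Nodup) (k : Int) (hk : k ∈ candidats) :
    (candidats.map (fun q => if q ≠ k ∧ pvLk dom k q = true then (1 : Int) else 0)).sum
    = (dom.map (fun e => if e.2.2 = true ∧ e.1 ≠ e.2.1 ∧ e.1 ∈ candidats ∧ e.2.1 ∈ candidats ∧ e.1 = k then (candidats.count e.2.1 : Int) else 0)).sum := by
  induction dom with
  | nil => simp [pvLk_nil]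
  | cons e rest ih =>
      simp only [List.map_cons, List.nodup_cons] at hnd
      obtain ⟨hne, hrest⟩ := hnd
      simp only [List.map_cons, List.sum_cons]
      by_cases h1 : e.1 = k
      · -- the head edge is a potential win of k over e.2.1
        have hlkb : pvLk rest k e.2.1 = false := by
          apply pvLk_of_not_mem; rw [← h1]; exact hne
        have hF : pvLk (e :: rest) k e.2.1 = e.2.2 := by
          rw [pvLk_cons]; simp [h1]
        have hstep := sum_map_update_point candidats
          (fun q => if q ≠ k ∧ pvLk (e :: rest) k q = true then (1 : Int) else 0)
          (fun q => if q ≠ k ∧ pvLk rest k q = true then (1 : Int) else 0) e.2.1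
          (by
            intro q hq
            simp only
            rw [pvLk_cons]
            have hx : ¬ (e.1 = k ∧ e.2.1 = q) := by rintro ⟨_, h2⟩; exact hq h2.symm
            simp [hx])
        simp only [hF, hlkb] at hstep
        rw [hstep, ih hrest]
        by_cases hb : e.2.1 ∈ candidats
        · by_cases hbk : e.2.1 = k
          · simp [hbk, h1]
          · by_cases hw : e.2.2 = true
            · have hall : (e.2.2 = true ∧ e.1 ≠ e.2.1 ∧ e.1 ∈ candidats ∧ e.2.1 ∈ candidats ∧ e.1 = k) := by
                refine ⟨hw, ?_, h1 ▸ hk, hb, h1⟩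
                rw [h1]; exact fun hkb => hbk hkb.symm
              have h5 : (if e.2.1 ≠ k ∧ e.2.2 = true then (1 : Int) else 0) = 1 := by
                simp [hbk, hw]
              have h6 : (if e.2.1 ≠ k ∧ false = true then (1 : Int) else 0) = 0 := by simp
              rw [h5, h6, if_pos hall]; ring
            · simp [hw, hbk]
        · have hc0 : List.count e.2.1 candidats = 0 := List.count_eq_zero_of_not_mem hb
          have hx : ¬ (e.2.2 = true ∧ e.1 ≠ e.2.1 ∧ e.1 ∈ candidats ∧ e.2.1 ∈ candidats ∧ e.1 = k) := by tauto
          simp [hx, hc0]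
      · -- head edge is not a win of k: lookup unchanged on every q
        have : (fun q => if q ≠ k ∧ pvLk (e :: rest) k q = true then (1 : Int) else 0)
            = (fun q => if q ≠ k ∧ pvLk rest k q = true then (1 : Int) else 0) := by
          funext q; rw [pvLk_cons]
          have : ¬ (e.1 = k ∧ e.2.1 = q) := by rintro ⟨ha, _⟩; exact h1 ha
          simp [this]
        rw [this, ih hrest]
        have : ¬ (e.2.2 = true ∧ e.1 ≠ e.2.1 ∧ e.1 ∈ candidats ∧ e.2.1 ∈ candidats ∧ e.1 = k) := by tauto
        simp [this]

-- A's "defaites" scan equals B's loss contributions, given unique edge keys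
lemma pvLosses (candidats : List Int) (dom : List (Int × Int × Bool))
    (hnd : (dom.map (fun e => (e.1, e.2.1))).Nodup) (k : Int) (hk : k ∈ candidats) :
    (candidats.map (fun q => if q ≠ k ∧ pvLk dom q k = true then (1 : Int) else 0)).sum
    = (dom.map (fun e => if e.2.2 = true ∧ e.1 ≠ e.2.1 ∧ e.1 ∈ candidats ∧ e.2.1 ∈ candidats ∧ e.2.1 = k then (candidats.count e.1 : Int) else 0)).sum := by
  induction dom with
  | nil => simp [pvLk_nil]
  | cons e rest ih =>
      simp only [List.map_cons, List.nodup_cons] at hnd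
      obtain ⟨hne, hrest⟩ := hnd
      simp only [List.map_cons, List.sum_cons]
      by_cases h2 : e.2.1 = k
      · have hlka : pvLk rest e.1 k = false := by
          apply pvLk_of_not_mem; rw [← h2]; exact hne
        have hF : pvLk (e :: rest) e.1 k = e.2.2 := by
          rw [pvLk_cons]; simp [h2]
        have hstep := sum_map_update_point candidats
          (fun q => if q ≠ k ∧ pvLk (e :: rest) q k = true then (1 : Int) else 0)
          (fun q => if q ≠ k ∧ pvLk rest q k = true then (1 : Int) else 0) e.1
          (by
            intro q hq
            simp only
            rw [pvLk_cons]
            have hx : ¬ (e.1 = q ∧ e.2.1 = k) := by rintro ⟨ha, _⟩; exact hq ha.symm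
            simp [hx])
        simp only [hF, hlka] at hstep
        rw [hstep, ih hrest]
        by_cases ha : e.1 ∈ candidats
        · by_cases hak : e.1 = k
          · simp [hak, h2]
          · by_cases hw : e.2.2 = true
            · have hall : (e.2.2 = true ∧ e.1 ≠ e.2.1 ∧ e.1 ∈ candidats ∧ e.2.1 ∈ candidats ∧ e.2.1 = k) := by
                refine ⟨hw, ?_, ha, h2 ▸ hk, h2⟩
                rw [h2]; exact hak
              have h5 : (if e.1 ≠ k ∧ e.2.2 = true then (1 : Int) else 0) = 1 := by
                simp [hak, hw]
              have h6 : (if e.1 ≠ k ∧ false = true then (1 : Int) else 0) = 0 := by simp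
              rw [h5, h6, if_pos hall]; ring
            · simp [hw, hak]
        · have hc0 : List.count e.1 candidats = 0 := List.count_eq_zero_of_not_mem ha
          have hx : ¬ (e.2.2 = true ∧ e.1 ≠ e.2.1 ∧ e.1 ∈ candidats ∧ e.2.1 ∈ candidats ∧ e.2.1 = k) := by tauto
          simp [hx, hc0]
      · have : (fun q => if q ≠ k ∧ pvLk (e :: rest) q k = true then (1 : Int) else 0)
            = (fun q => if q ≠ k ∧ pvLk rest q k = true then (1 : Int) else 0) := by
          funext q; rw [pvLk_cons]
          have : ¬ (e.1 = q ∧ e.2.1 = k) := by rintro ⟨_, hb⟩; exact h2 hb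
          simp [this]
        rw [this, ih hrest]
        have : ¬ (e.2.2 = true ∧ e.1 ≠ e.2.1 ∧ e.1 ∈ candidats ∧ e.2.1 ∈ candidats ∧ e.2.1 = k) := by tauto
        simp [this]

-- getD through B's edge pass
lemma pvB_getD (candidats : List Int) (dom : List (Int × Int × Bool)) (s : PySem.Dict Int Int) (k : Int) :
    (dom.foldl (fun s e =>
        if e.2.2 = true ∧ e.1 ≠ e.2.1 ∧ (PySem.Dict.counter candidats).contains e.1 = true ∧ (PySem.Dict.counter candidats).contains e.2.1 = true then
          (s.modify e.1 0 (· + (PySem.Dict.counter candidats).getD e.2.1 0)).modify e.2.1 0 (· - (PySem.Dict.counter candidats).getD e.1 0)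
        else s) s).getD k 0
    = s.getD k 0 + pvDelta candidats dom k := by
  induction dom generalizing s with
  | nil => simp [pvDelta]
  | cons e rest ih =>
      rw [List.foldl_cons]
      rw [ih]
      have hdelta : pvDelta candidats (e :: rest) k = pvContrib candidats e k + pvDelta candidats rest k := by
        simp [pvDelta]
      rw [hdelta]
      by_cases hg : e.2.2 = true ∧ e.1 ≠ e.2.1 ∧ (PySem.Dict.counter candidats).contains e.1 = true ∧ (PySem.Dict.counter candidats).contains e.2.1 = true
      · rw [if_pos hg]
        obtain ⟨hw, hab, hca, hcb⟩ := hg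
        rw [PySem.Dict.contains_counter] at hca hcb
        have hma : e.1 ∈ candidats := by simpa using hca
        have hmb : e.2.1 ∈ candidats := by simpa using hcb
        have hcon : pvContrib candidats e k
            = (if e.1 = k then (candidats.count e.2.1 : Int) else 0)
              - (if e.2.1 = k then (candidats.count e.1 : Int) else 0) := by
          simp [pvContrib, hw, hab, hma, hmb]
        rw [hcon]
        simp only [PySem.Dict.getD_modify, PySem.Dict.getD_counter]
        by_cases hk1 : k = e.1
        · subst hk1
          split_ifs <;> omega
        · by_cases hk2 : k = e.2.1
          · subst hk2
            split_ifs <;> omega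
          · split_ifs <;> omega
      · rw [if_neg hg]
        have hcon : pvContrib candidats e k = 0 := by
          simp only [PySem.Dict.contains_counter] at hg
          have hx : ¬ (e.2.2 = true ∧ e.1 ≠ e.2.1 ∧ e.1 ∈ candidats ∧ e.2.1 ∈ candidats) := by
            intro ⟨a, b, c, d⟩
            exact hg ⟨a, b, by simpa using c, by simpa using d⟩
          have h1 : ¬ (e.2.2 = true ∧ e.1 ≠ e.2.1 ∧ e.1 ∈ candidats ∧ e.2.1 ∈ candidats ∧ e.1 = k) := by tauto
          have h2 : ¬ (e.2.2 = true ∧ e.1 ≠ e.2.1 ∧ e.1 ∈ candidats ∧ e.2.1 ∈ candidats ∧ e.2.1 = k) := by tauto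
          simp [pvContrib, h1, h2]
        rw [hcon]; ring

-- B's edge pass never changes the key set
lemma pvB_keys (candidats : List Int) (dom : List (Int × Int × Bool)) (s : PySem.Dict Int Int)
    (hs : s.keys = PySem.Set.ofList candidats) :
    (dom.foldl (fun s e =>
        if e.2.2 = true ∧ e.1 ≠ e.2.1 ∧ (PySem.Dict.counter candidats).contains e.1 = true ∧ (PySem.Dict.counter candidats).contains e.2.1 = true then
          (s.modify e.1 0 (· + (PySem.Dict.counter candidats).getD e.2.1 0)).modify e.2.1 0 (· - (PySem.Dict.counter candidats).getD e.1 0)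
        else s) s).keys = PySem.Set.ofList candidats := by
  induction dom generalizing s with
  | nil => simpa using hs
  | cons e rest ih =>
      rw [List.foldl_cons]
      by_cases hg : e.2.2 = true ∧ e.1 ≠ e.2.1 ∧ (PySem.Dict.counter candidats).contains e.1 = true ∧ (PySem.Dict.counter candidats).contains e.2.1 = true
      · rw [if_pos hg]
        obtain ⟨_, _, hca, hcb⟩ := hg
        rw [PySem.Dict.contains_counter] at hca hcb
        have hma : e.1 ∈ PySem.Set.ofList candidats := (PySem.Set.mem_ofList _ _).2 (by simpa using hca)
        have hmb : e.2.1 ∈ PySem.Set.ofList candidats := (PySem.Set.mem_ofList _ _).2 (by simpa using hcb)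
        apply ih
        have hca' : s.contains e.1 = true := (PySem.Dict.contains_iff_mem_keys s e.1).2 (hs ▸ hma)
        have hkeys1 : (s.modify e.1 0 (· + (PySem.Dict.counter candidats).getD e.2.1 0)).keys = s.keys := by
          rw [PySem.Dict.keys_modify, PySem.Dict.keys_insert_of_contains s _ hca']
        have hcb' : (s.modify e.1 0 (· + (PySem.Dict.counter candidats).getD e.2.1 0)).contains e.2.1 = true :=
          (PySem.Dict.contains_iff_mem_keys _ _).2 (by rw [hkeys1, hs]; exact hmb)
        rw [PySem.Dict.keys_modify, PySem.Dict.keys_insert_of_contains _ _ hcb', hkeys1, hs]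
      · rw [if_neg hg]; exact ih s hs

lemma pvDelta_split (candidats : List Int) (dom : List (Int × Int × Bool)) (k : Int) :
    pvDelta candidats dom k
    = (dom.map (fun e => if e.2.2 = true ∧ e.1 ≠ e.2.1 ∧ e.1 ∈ candidats ∧ e.2.1 ∈ candidats ∧ e.1 = k then (candidats.count e.2.1 : Int) else 0)).sum
      - (dom.map (fun e => if e.2.2 = true ∧ e.1 ≠ e.2.1 ∧ e.1 ∈ candidats ∧ e.2.1 ∈ candidats ∧ e.2.1 = k then (candidats.count e.1 : Int) else 0)).sum := by
  induction dom with
  | nil => simp [pvDelta]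
  | cons e rest ih =>
      simp only [pvDelta, List.map_cons, List.sum_cons] at *
      rw [ih]; simp only [pvContrib]; ring

-- ===== VERDICT (by name: the statement is the Claim_ definition above) =====
theorem calculer_copeland_py_spec : Claim_equal_calculer_copeland_py := by
  intro candidats dom _hDom hPre
  unfold Spec_calculer_copeland_py
  unfold Pre_calculer_copeland_py at hPre
  show (candidats.foldl (fun scores p => scores.insert p (pvScore candidats dom p)) PySem.Dict.empty).items
      = calculer_copeland_py_alt candidats dom
  unfold calculer_copeland_py_alt
  rw [show (candidats.foldl (fun d p => d.insert p (d.getD p 0 + 1)) PySem.Dict.empty)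
        = PySem.Dict.counter candidats from PySem.Dict.foldl_insert_getD_add_one_eq_counter candidats]
  -- both dicts have key list Set.ofList candidats
  have hkeysA : (candidats.foldl (fun scores p => scores.insert p (pvScore candidats dom p)) PySem.Dict.empty).keys
      = PySem.Set.ofList candidats := by
    rw [PySem.Dict.keys_foldl_insert candidats (fun _ p => pvScore candidats dom p)]
    simp [PySem.Set.update_nil_left]
  have hkeys0 : (candidats.foldl (fun d p => d.insert p (0 : Int)) PySem.Dict.empty).keys
      = PySem.Set.ofList candidats := by
    rw [PySem.Dict.keys_foldl_insert candidats (fun _ _ => (0 : Int))]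
    simp [PySem.Set.update_nil_left]
  have hkeysB := pvB_keys candidats dom _ hkeys0
  have hnodup : (PySem.Set.ofList candidats : List Int).Nodup := PySem.Set.nodup_ofList candidats
  rw [PySem.Dict.items_eq_map_keys _ (hkeysA ▸ hnodup) 0,
      PySem.Dict.items_eq_map_keys _ (hkeysB ▸ hnodup) 0, hkeysA, hkeysB]
  apply List.map_congr_left
  intro k hkset
  have hk : k ∈ candidats := (PySem.Set.mem_ofList _ _).1 hkset
  have hA : (candidats.foldl (fun scores p => scores.insert p (pvScore candidats dom p)) PySem.Dict.empty).getD k 0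
      = pvScore candidats dom k := by
    rw [getD_foldl_insert_fun candidats (pvScore candidats dom)]
    simp [hk]
  have h0 : (candidats.foldl (fun d p => d.insert p (0 : Int)) PySem.Dict.empty).getD k 0 = 0 := by
    rw [getD_foldl_insert_fun candidats (fun _ => (0 : Int))]
    simp [hk]
  have hB := pvB_getD candidats dom (candidats.foldl (fun d p => d.insert p (0 : Int)) PySem.Dict.empty) k
  rw [h0, zero_add] at hB
  rw [hA, hB, pvDelta_split, pvScore, pvWins candidats dom hPre k hk, pvLosses candidats dom hPre k hk]
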